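-- pv_equiv track=rewrite | github.com/Zachary-Lee-Jaeho/gensparktest | src/llvm_extraction/parser.py | _parse_single_param
-- ===== SOURCE A (Python) =====
-- from typing import List, Dict, Optional, Tuple, Set
--
-- def _parse_single_param(param: str) -> Tuple[str, str]:
--     """Parse a single parameter into (type, name)."""
--     # Handle default values
--     if '=' in param:
--         param = param.split('=')[0].strip()
--
--     # Split type and name
--     parts = param.rsplit(None, 1)
--     if len(parts) == 2:
--         type_part, name_part = parts
--         # Handle pointers/references attached to name
--         while name_part and name_part[0] in '*&':
--             type_part += name_part[0]
--             name_part = name_part[1:]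
--         return (type_part.strip(), name_part.strip())
--     else:
--         return (param, "")
-- ===== SOURCE B (Python) =====
-- def _parse_single_param(param: str):
--     """Parse a single parameter into (type, name) by a single right-to-left scan."""
--     # Handle default values (same pre-step as the original)
--     if '=' in param:
--         param = param.split('=')[0].strip()
--
--     stripped = param.strip()
--     # find the start of the last whitespace-free chunk
--     cut = len(stripped)
--     while cut > 0 and not stripped[cut - 1].isspace():
--         cut -= 1
--     if cut == 0:
--         # no whitespace inside: nothing to split off
--         return (param, "")
--     name = stripped[cut:]
--     # move leading '*'/'&' of the name over to the type
--     p = 0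
--     while p < len(name) and name[p] in '*&':
--         p += 1
--     return (stripped[:cut].rstrip() + name[:p], name[p:])
-- ===== Notes on version B (the rewrite author's own statement) =====
-- stated objective: simpler
-- what changed: B replaces A's rsplit(None,1) (reverse, two dropWhile/takeWhile passes and an intermediate parts list) by one right-to-left index scan over the stripped string that finds the split point directly, then slices type and name out of it.
import Mathlib
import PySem

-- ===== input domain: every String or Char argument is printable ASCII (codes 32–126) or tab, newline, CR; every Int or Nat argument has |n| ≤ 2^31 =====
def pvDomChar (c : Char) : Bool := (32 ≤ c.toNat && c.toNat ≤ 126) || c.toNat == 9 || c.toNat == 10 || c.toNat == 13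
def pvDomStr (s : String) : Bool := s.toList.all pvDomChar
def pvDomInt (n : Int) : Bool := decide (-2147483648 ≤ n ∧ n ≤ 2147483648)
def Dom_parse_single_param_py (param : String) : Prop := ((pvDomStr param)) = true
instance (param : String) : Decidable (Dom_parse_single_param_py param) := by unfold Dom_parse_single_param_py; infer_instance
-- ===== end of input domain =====

-- B replaces A's reverse-split helper (rsplit(None,1)) by a single right-to-left index scan over the
-- stripped string; objective: simpler (no intermediate parts list, one scan for the split point).

-- ===== PORT A =====
-- Python str.rsplit(None, 1), ported by hand (PySem has no rsplit); exact for maxsplit = 1: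
-- drop trailing whitespace; if nothing left, []; else the last whitespace-free run is the final
-- token, and the remainder (with the separating whitespace run removed) is the first piece if
-- it still contains anything.
def pyRsplitWs1 (s : List Char) : List (List Char) :=
  let rev := s.reverse.dropWhile PySem.Chars.isspace
  if rev = [] then []
  else
    let tok := (rev.takeWhile (fun c => !PySem.Chars.isspace c)).reverse
    let restRev := (rev.dropWhile (fun c => !PySem.Chars.isspace c)).dropWhile PySem.Chars.isspace
    if restRev = [] then [tok] else [restRev.reverse, tok]

-- the while loop: while name_part and name_part[0] in '*&': move that char onto type_part
def pvMovePtr : List Char → List Char → List Char × List Char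
  | t, c :: rest => if c == '*' || c == '&' then pvMovePtr (t ++ [c]) rest else (t, c :: rest)
  | t, [] => (t, [])

-- body of A after the default-value pre-step (the pre-step is shared syntax in both Pythons)
def pvACore (cs : List Char) : String × String :=
  match pyRsplitWs1 cs with
  | [type_part, name_part] =>
      let r := pvMovePtr type_part name_part
      (String.ofList (PySem.Chars.strip r.1), String.ofList (PySem.Chars.strip r.2))
  | _ => (String.ofList cs, "")

def parse_single_param_py (param : String) : String × String :=
  let cs0 := param.toList
  -- if '=' in param: param = param.split('=')[0].strip()   (split('=') is never empty, [0] is its head)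
  pvACore (if PySem.Chars.isIn ['='] cs0 then
             PySem.Chars.strip ((PySem.Chars.splitOn cs0 ['=']).headD []) else cs0)

-- ===== PORT B =====
-- while cut > 0 and not stripped[cut-1].isspace(): cut -= 1   (index cut-1 is always in range)
def pvBCut (s : List Char) : Nat → Nat
  | 0 => 0
  | n + 1 => if !PySem.Chars.isspace (s.getD n ' ') then pvBCut s n else n + 1

-- while p < len(name) and name[p] in '*&': p += 1
def pvPtrLen : List Char → Nat
  | c :: rest => if c == '*' || c == '&' then pvPtrLen rest + 1 else 0
  | [] => 0

-- body of B after the default-value pre-step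
def pvBCore (cs : List Char) : String × String :=
  let st := PySem.Chars.strip cs
  let cut := pvBCut st st.length
  if cut = 0 then (String.ofList cs, "")
  else
    let name := st.drop cut
    let p := pvPtrLen name
    (String.ofList (PySem.Chars.rstrip (st.take cut) ++ name.take p), String.ofList (name.drop p))

def parse_single_param_py_alt (param : String) : String × String :=
  let cs0 := param.toList
  -- if '=' in param: param = param.split('=')[0].strip()
  pvBCore (if PySem.Chars.isIn ['='] cs0 then
             PySem.Chars.strip ((PySem.Chars.splitOn cs0 ['=']).headD []) else cs0)

-- ===== PRECONDITION & SPEC =====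
def Spec_parse_single_param_py (param : String) (out : String × String) : Prop := out = parse_single_param_py_alt param
instance (param : String) (out : String × String) : Decidable (Spec_parse_single_param_py param out) := by unfold Spec_parse_single_param_py; infer_instance

-- ===== CLAIM (what is proved, stated in full; the proofs are below) =====
def Claim_equal_parse_single_param_py : Prop := ∀ (param : String), Dom_parse_single_param_py param → Spec_parse_single_param_py param (parse_single_param_py param)

-- ===== LEMMAS AND PROOFS =====


-- generic list lemmas used by the equivalence proof

theorem pv_dropWhile_head? {α : Type} {p : α → Bool} {l : List α}
    (h : ∀ c, l.head? = some c → p c = false) : l.dropWhile p = l := by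
  cases l with
  | nil => rfl
  | cons a l => simp [List.dropWhile, h a rfl]

theorem pv_dropWhile_all_prefix {α : Type} {p : α → Bool} {w l : List α}
    (h : ∀ c ∈ w, p c = true) : (w ++ l).dropWhile p = l.dropWhile p := by
  induction w with
  | nil => rfl
  | cons a w ih =>
      simp only [List.cons_append, List.dropWhile_cons]
      rw [h a (by simp)]
      simp [ih (fun c hc => h c (by simp [hc]))]

theorem pv_dropWhile_not_all {α : Type} {p : α → Bool} {w : List α}
    (h : ∀ c ∈ w, p c = true) : w.dropWhile (fun c => !p c) = w := by
  apply pv_dropWhile_head?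
  intro c hc
  cases w with
  | nil => simp at hc
  | cons a w => simp at hc; subst hc; simp [h a (by simp)]

theorem pv_takeWhile_not_all {α : Type} {p : α → Bool} {w : List α}
    (h : ∀ c ∈ w, p c = true) : w.takeWhile (fun c => !p c) = [] := by
  cases w with
  | nil => rfl
  | cons a w => simp [h a (by simp)]

theorem pv_getLast?_suffix {α : Type} {m l : List α} (h : m <:+ l) (hm : m ≠ []) :
    m.getLast? = l.getLast? := by
  obtain ⟨pre, rfl⟩ := h
  rw [List.getLast?_append]
  cases hg : m.getLast? with
  | none => exact absurd (List.getLast?_eq_none_iff.mp hg) hm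
  | some a => rfl

theorem pv_strip_nonws {l : List Char} (h : ∀ c ∈ l, PySem.Chars.isspace c = false) :
    PySem.Chars.strip l = l := by
  simp only [PySem.Chars.strip, PySem.Chars.lstrip, PySem.Chars.rstrip]
  rw [pv_dropWhile_head? (fun c hc => h c (List.mem_of_mem_head? hc))]
  rw [pv_dropWhile_head? (fun c hc => h c (by
        rw [List.head?_reverse] at hc
        exact List.mem_of_getLast? hc))]
  exact List.reverse_reverse l

-- pvBCut on an extended list agrees below the extension
theorem pv_bCut_append (s : List Char) (c : Char) :
    ∀ n, n ≤ s.length → pvBCut (s ++ [c]) n = pvBCut s n := by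
  intro n hn
  induction n with
  | zero => rfl
  | succ n ih =>
      simp only [pvBCut]
      rw [List.getD_append _ _ _ n (by omega)]
      split
      · exact ih (by omega)
      · rfl

-- the value of B's scanning loop: length of the part up to (and including) the last whitespace
theorem pv_bCut_eq (s : List Char) :
    pvBCut s s.length = (s.reverse.dropWhile (fun c => !PySem.Chars.isspace c)).length := by
  induction s using List.reverseRecOn with
  | nil => rfl
  | append_singleton t c ih =>
      have hlen : (t ++ [c]).length = t.length + 1 := by simp
      rw [hlen]
      simp only [pvBCut]
      rw [List.getD_append_right _ _ _ _ (le_refl _)]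
      simp only [Nat.sub_self, List.getD_cons_zero, List.reverse_append, List.reverse_cons,
        List.reverse_nil, List.nil_append, List.cons_append, List.dropWhile_cons]
      by_cases hc : PySem.Chars.isspace c
      · simp [hc]
      · simp only [hc]
        rw [pv_bCut_append t c t.length (le_refl _)]
        simpa using ih

-- A's pointer-moving while loop, in closed form via B's counter
theorem pv_movePtr_eq : ∀ (n t : List Char),
    pvMovePtr t n = (t ++ n.take (pvPtrLen n), n.drop (pvPtrLen n)) := by
  intro n
  induction n with
  | nil => intro t; simp [pvMovePtr, pvPtrLen]
  | cons c rest ih =>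
      intro t
      simp only [pvMovePtr, pvPtrLen]
      by_cases hc : (c == '*' || c == '&') = true
      · simp only [hc, if_true, ih]
        simp [List.take_succ_cons, List.drop_succ_cons]
      · simp only [Bool.not_eq_true] at hc
        simp [hc]

theorem pv_core_eq (cs : List Char) : pvACore cs = pvBCore cs := by
  set t := cs.dropWhile PySem.Chars.isspace with ht
  set w := cs.takeWhile PySem.Chars.isspace with hwdefn
  have hw : ∀ c ∈ w, PySem.Chars.isspace c = true := fun c hc => List.mem_takeWhile_imp hc
  have hcs : w ++ t = cs := List.takeWhile_append_dropWhile
  set sr := t.reverse.dropWhile PySem.Chars.isspace with hsr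
  have hst : PySem.Chars.strip cs = sr.reverse := rfl
  by_cases ht0 : t = []
  · -- cs is all whitespace: both sides return (cs, "")
    have hall : ∀ c ∈ cs, PySem.Chars.isspace c = true := List.dropWhile_eq_nil_iff.mp ht0
    have hrev : cs.reverse.dropWhile PySem.Chars.isspace = [] :=
      List.dropWhile_eq_nil_iff.mpr (fun x hx => hall x (List.mem_reverse.mp hx))
    have hA : pyRsplitWs1 cs = [] := by
      simp only [pyRsplitWs1]
      rw [hrev, if_pos rfl]
    have hst0 : PySem.Chars.strip cs = [] := by
      rw [hst, hsr, ht0]; rfl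
    simp only [pvACore, hA, pvBCore, hst0]
    rfl
  · have hth : PySem.Chars.isspace (t.head ht0) = false :=
      List.head_dropWhile_not PySem.Chars.isspace ht0
    have hsr_ne : sr ≠ [] := by
      intro h
      have := List.dropWhile_eq_nil_iff.mp h (t.head ht0) (List.mem_reverse.mpr (List.head_mem ht0))
      rw [hth] at this; exact absurd this (by simp)
    have hsr_last : sr.getLast? = some (t.head ht0) := by
      rw [pv_getLast?_suffix (List.dropWhile_suffix PySem.Chars.isspace) hsr_ne,
        List.getLast?_reverse, List.head?_eq_some_head ht0]
    have hrev : cs.reverse.dropWhile PySem.Chars.isspace = sr ++ w.reverse := by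
      conv_lhs => rw [← hcs]
      rw [List.reverse_append, List.dropWhile_append, ← hsr,
        if_neg (by simp [List.isEmpty_iff, hsr_ne])]
    have hrev_ne : sr ++ w.reverse ≠ [] := by simp [hsr_ne]
    have htok : (sr ++ w.reverse).takeWhile (fun c => !PySem.Chars.isspace c)
        = sr.takeWhile (fun c => !PySem.Chars.isspace c) := by
      rw [List.takeWhile_append]
      split
      · rename_i hfull
        rw [(List.takeWhile_prefix _).eq_of_length hfull,
          pv_takeWhile_not_all (fun c hc => hw c (List.mem_reverse.mp hc)), List.append_nil]
      · rfl
    set tk := sr.takeWhile (fun c => !PySem.Chars.isspace c) with htk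
    set d := sr.dropWhile (fun c => !PySem.Chars.isspace c) with hd
    have htkd : tk ++ d = sr := List.takeWhile_append_dropWhile
    have hdropq : (sr ++ w.reverse).dropWhile (fun c => !PySem.Chars.isspace c)
        = d ++ w.reverse := by
      rw [List.dropWhile_append, ← hd]
      split
      · rename_i hde
        rw [List.isEmpty_iff] at hde
        rw [pv_dropWhile_not_all (fun c hc => hw c (List.mem_reverse.mp hc)), hde,
          List.nil_append]
      · rfl
    have hcut : pvBCut (PySem.Chars.strip cs) (PySem.Chars.strip cs).length = d.length := by
      rw [pv_bCut_eq, hst, List.reverse_reverse, ← hd]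
    by_cases hd0 : d = []
    · -- a single token: both sides return (cs, "")
      have hrest : (d ++ w.reverse).dropWhile PySem.Chars.isspace = [] := by
        rw [hd0, List.nil_append]
        exact List.dropWhile_eq_nil_iff.mpr (fun x hx => hw x (List.mem_reverse.mp hx))
      have hA : pyRsplitWs1 cs = [tk.reverse] := by
        simp only [pyRsplitWs1]
        rw [hrev, if_neg hrev_ne, htok, hdropq, hrest, if_pos rfl]
      have hcut0 : pvBCut (PySem.Chars.strip cs) (PySem.Chars.strip cs).length = 0 := by
        rw [hcut, hd0]; rfl
      simp only [pvACore, hA, pvBCore, hcut0]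
      rfl
    · -- two tokens
      have hd_last : d.getLast? = some (t.head ht0) := by
        rw [pv_getLast?_suffix (List.dropWhile_suffix _) hd0, hsr_last]
      have hdw_ne : d.dropWhile PySem.Chars.isspace ≠ [] := by
        intro h
        have := List.dropWhile_eq_nil_iff.mp h (t.head ht0) (List.mem_of_getLast? hd_last)
        rw [hth] at this; exact absurd this (by simp)
      have hdw_last : (d.dropWhile PySem.Chars.isspace).getLast? = some (t.head ht0) := by
        rw [pv_getLast?_suffix (List.dropWhile_suffix _) hdw_ne, hd_last]
      have hrest : (d ++ w.reverse).dropWhile PySem.Chars.isspace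
          = d.dropWhile PySem.Chars.isspace ++ w.reverse := by
        rw [List.dropWhile_append]
        simp only [List.isEmpty_iff, hdw_ne, if_false]
      have hrest_ne : d.dropWhile PySem.Chars.isspace ++ w.reverse ≠ [] := by simp [hdw_ne]
      have hA : pyRsplitWs1 cs
          = [(d.dropWhile PySem.Chars.isspace ++ w.reverse).reverse, tk.reverse] := by
        simp only [pyRsplitWs1]
        rw [hrev, if_neg hrev_ne, htok, hdropq, hrest, if_neg hrest_ne]
      set np := tk.reverse with hnp
      have hnp_all : ∀ c ∈ np, PySem.Chars.isspace c = false := by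
        intro c hc
        have := List.mem_takeWhile_imp (List.mem_reverse.mp hc)
        simpa using this
      set k := pvPtrLen np with hk
      have hmv := pv_movePtr_eq np ((d.dropWhile PySem.Chars.isspace ++ w.reverse).reverse)
      rw [← hk] at hmv
      have hname : PySem.Chars.strip (np.drop k) = np.drop k :=
        pv_strip_nonws (fun c hc => hnp_all c (List.mem_of_mem_drop hc))
      set Z := (d.dropWhile PySem.Chars.isspace).reverse ++ np.take k with hZ
      have hZhead : ∀ c, Z.head? = some c → PySem.Chars.isspace c = false := by
        intro c hc
        rw [hZ, List.head?_append, List.head?_reverse, hdw_last] at hc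
        have : c = t.head ht0 := by simpa using hc.symm
        rw [this, hth]
      have hZlast : ∀ c, Z.reverse.head? = some c → PySem.Chars.isspace c = false := by
        intro c hc
        rw [List.head?_reverse, hZ, List.getLast?_append] at hc
        cases hg : (np.take k).getLast? with
        | some a =>
            rw [hg] at hc
            have hca : c = a := by simpa using hc.symm
            exact hca ▸ hnp_all a (List.mem_of_mem_take (List.mem_of_getLast? hg))
        | none =>
            rw [hg, Option.none_or, List.getLast?_reverse,
              List.head?_eq_some_head hdw_ne] at hc
            have : c = (d.dropWhile PySem.Chars.isspace).head hdw_ne := by simpa using hc.symm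
            rw [this]
            exact List.head_dropWhile_not PySem.Chars.isspace hdw_ne
      have hZrw : (d.dropWhile PySem.Chars.isspace ++ w.reverse).reverse ++ np.take k
          = w ++ Z := by
        rw [List.reverse_append, List.reverse_reverse, List.append_assoc, hZ]
      have htype : PySem.Chars.strip
          ((d.dropWhile PySem.Chars.isspace ++ w.reverse).reverse ++ np.take k) = Z := by
        rw [hZrw]
        simp only [PySem.Chars.strip, PySem.Chars.lstrip, PySem.Chars.rstrip]
        rw [pv_dropWhile_all_prefix hw, pv_dropWhile_head? hZhead,
          pv_dropWhile_head? hZlast, List.reverse_reverse]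
      have hcut_ne : ¬ pvBCut (PySem.Chars.strip cs) (PySem.Chars.strip cs).length = 0 := by
        rw [hcut]; simpa [List.length_eq_zero_iff] using hd0
      have hst_split : PySem.Chars.strip cs = d.reverse ++ np := by
        rw [hst, ← htkd, List.reverse_append, hnp]
      have hdrop : (PySem.Chars.strip cs).drop
          (pvBCut (PySem.Chars.strip cs) (PySem.Chars.strip cs).length) = np := by
        rw [hcut, hst_split, ← List.length_reverse (as := d), List.drop_left]
      have htake : (PySem.Chars.strip cs).take
          (pvBCut (PySem.Chars.strip cs) (PySem.Chars.strip cs).length) = d.reverse := by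
        rw [hcut, hst_split, ← List.length_reverse (as := d), List.take_left]
      have hrs : PySem.Chars.rstrip d.reverse = (d.dropWhile PySem.Chars.isspace).reverse := by
        simp only [PySem.Chars.rstrip]
        rw [List.reverse_reverse]
      simp only [pvACore, hA, hmv, htype, hname, pvBCore, if_neg hcut_ne, hdrop, htake, hrs, hZ,
        ← hk]

-- ===== VERDICT (by name: the statement is the Claim_ definition above) =====
theorem parse_single_param_py_spec : Claim_equal_parse_single_param_py := by
  intro param _
  unfold Spec_parse_single_param_py parse_single_param_py parse_single_param_py_alt
  exact pv_core_eq _
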